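-- pv_equiv track=rewrite | github.com/chchaeun/study-algorithm | 기출/카카오/2022-mobility-2.py | solution
-- ===== SOURCE A (Python) =====
-- from collections import defaultdict
--
-- def solution(id_list, k):
--     coupon = defaultdict(int)
--     for ids in id_list:
--         for id in set(ids.split()):
--             if coupon[id] < k:
--                 coupon[id] += 1
--
--     answer = sum(coupon.values())
--
--     return answer
-- ===== SOURCE B (Python) =====
-- def solution(id_list, k):
--     # Precompute each report's token set, then for each distinct id (first time
--     # it is seen) count by scanning how many reports' sets contain it, capped at k.
--     report_sets = [set(ids.split()) for ids in id_list]
--     total = 0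
--     counted = set()
--     for s in report_sets:
--         for id in s:
--             if id not in counted:
--                 counted.add(id)
--                 total += min(sum(1 for t in report_sets if id in t), k)
--     return total
-- ===== Notes on version B (the rewrite author's own statement) =====
-- stated objective: alternative
-- what changed: B keeps no counter table at all: it precomputes the per-report token sets, then for each id, the first time it is encountered, counts its occurrences by a membership scan over all report sets and adds min(count, k); A instead threads one capped dict counter through a single pass. The natural domain is k >= 0 (k caps a count), so Pre_ excludes negative k, where A returns 0 while B's per-id capped count is negative.
-- outside the precondition, e.g. on solution(['a'], -1): A returns 0, B returns -1
import Mathlib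
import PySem

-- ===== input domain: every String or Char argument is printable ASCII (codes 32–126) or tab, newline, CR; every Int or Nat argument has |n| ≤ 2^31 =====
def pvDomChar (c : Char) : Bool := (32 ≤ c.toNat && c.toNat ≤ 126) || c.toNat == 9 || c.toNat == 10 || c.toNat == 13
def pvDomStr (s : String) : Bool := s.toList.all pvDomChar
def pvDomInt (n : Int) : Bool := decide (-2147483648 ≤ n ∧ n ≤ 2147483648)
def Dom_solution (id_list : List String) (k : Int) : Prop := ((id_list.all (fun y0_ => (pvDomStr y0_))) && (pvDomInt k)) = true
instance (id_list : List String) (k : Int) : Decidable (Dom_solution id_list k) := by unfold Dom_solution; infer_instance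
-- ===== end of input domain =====

-- B drops A's capped dict counter: it precomputes per-report token sets and, for each
-- id at its first occurrence, counts it by a membership scan over all report sets,
-- adding min(count, k); objective: alternative algorithm, same results.

-- ===== PORT A =====
-- defaultdict access `coupon[id]` materialises the key, so both branches keep the
-- entry present (the untaken branch re-stores the unchanged value).
def solution (id_list : List String) (k : Int) : Int :=
  let coupon : PySem.Dict String Int :=
    id_list.foldl (fun d ids =>
      (PySem.Set.ofList (PySem.Str.split₀ ids)).foldl (fun d id =>
        if d.getD id 0 < k then d.insert id (d.getD id 0 + 1)
        else d.insert id (d.getD id 0)) d)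
      PySem.Dict.empty
  coupon.values.sum

-- ===== PORT B =====
def solution_alt (id_list : List String) (k : Int) : Int :=
  let reportSets : List (PySem.Set String) :=
    id_list.map (fun ids => PySem.Set.ofList (PySem.Str.split₀ ids))
  let res : Int × PySem.Set String :=
    reportSets.foldl (fun st s =>
      s.foldl (fun (st : Int × PySem.Set String) id =>
        if st.2.contains id then st
        else (st.1 + min ((reportSets.countP (fun t => t.contains id) : Nat) : Int) k,
              PySem.Set.add st.2 id)) st)
      (0, PySem.Set.empty)
  res.1

-- ===== PRECONDITION & SPEC =====
-- Pre_ restricts to the problem's natural domain k ≥ 0 (k caps a count); for negative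
-- k A returns 0 while B's per-id capped count is negative — that narrowing is stated
-- in claim.json with a cite.
def Pre_solution (_id_list : List String) (k : Int) : Prop := 0 ≤ k
instance (id_list : List String) (k : Int) : Decidable (Pre_solution id_list k) := by unfold Pre_solution; infer_instance
def pvWitness_solution : List String × Int := (["user frodo", "frodo apeach", "frodo"], 2)

def Spec_solution (id_list : List String) (k : Int) (out : Int) : Prop := out = solution_alt id_list k
instance (id_list : List String) (k : Int) (out : Int) : Decidable (Spec_solution id_list k out) := by unfold Spec_solution; infer_instance

-- ===== CLAIM (what is proved, stated in full; the proofs are below) =====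
def Claim_equal_solution : Prop := ∀ (id_list : List String) (k : Int), Dom_solution id_list k → Pre_solution id_list k → Spec_solution id_list k (solution id_list k)

-- ===== LEMMAS AND PROOFS =====

-- A's capped-counter loop vs the plain counter loop over the same id stream:
-- same keys in the same order, and A's stored value is min (counter value) k.
theorem pv_fold_rel (k : Int) (ws : List String) :
    ∀ (dA dB : PySem.Dict String Int), dA.keys = dB.keys →
    (∀ x, dA.getD x 0 = min (dB.getD x 0) k) →
    (ws.foldl (fun d id =>
        if d.getD id 0 < k then d.insert id (d.getD id 0 + 1)
        else d.insert id (d.getD id 0)) dA).keys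
      = (ws.foldl (fun d id => d.insert id (d.getD id 0 + 1)) dB).keys ∧
    ∀ x, (ws.foldl (fun d id =>
        if d.getD id 0 < k then d.insert id (d.getD id 0 + 1)
        else d.insert id (d.getD id 0)) dA).getD x 0
      = min ((ws.foldl (fun d id => d.insert id (d.getD id 0 + 1)) dB).getD x 0) k := by
  induction ws with
  | nil => intro dA dB hkeys hval; exact ⟨hkeys, hval⟩
  | cons id rest ih =>
    intro dA dB hkeys hval
    simp only [List.foldl_cons]
    apply ih
    · -- keys stay equal after one step
      have hc : dA.contains id = dB.contains id := by
        rw [PySem.Dict.contains_eq_decide_mem_keys, PySem.Dict.contains_eq_decide_mem_keys, hkeys]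
      by_cases h : dB.contains id = true
      · have hA : dA.contains id = true := by rw [hc]; exact h
        split <;>
          simp [PySem.Dict.keys_insert_of_contains _ _ hA,
                PySem.Dict.keys_insert_of_contains _ _ h, hkeys]
      · have h' : dB.contains id = false := by simpa using h
        have hA : dA.contains id = false := by rw [hc]; exact h'
        split <;>
          simp [PySem.Dict.keys_insert_of_not_contains _ _ hA,
                PySem.Dict.keys_insert_of_not_contains _ _ h', hkeys]
    · intro x
      have hid := hval id
      have hx := hval x
      split <;> simp [PySem.Dict.getD_insert] <;> split <;> omega

-- B's inner loop over the flattened id stream: the second component is Set.update,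
-- and the total grows by the term of each newly seen id.
theorem pv_b_fold (term : String → Int) :
    ∀ (ws : List String) (seen : PySem.Set String) (total : Int),
    (ws.foldl (fun (st : Int × PySem.Set String) id =>
        if st.2.contains id then st
        else (st.1 + term id, PySem.Set.add st.2 id)) (total, seen)).1
      + (seen.map term).sum
      = total + ((PySem.Set.update seen ws).map term).sum := by
  intro ws
  induction ws with
  | nil => intro seen total; simp [PySem.Set.update]
  | cons id rest ih =>
    intro seen total
    simp only [List.foldl_cons]
    by_cases h : PySem.Set.contains seen id = true
    · have hm : id ∈ seen := by simpa [PySem.Set.contains] using h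
      have hadd : PySem.Set.add seen id = seen := by simp [PySem.Set.add, PySem.Set.contains, hm]
      rw [if_pos h]
      have := ih seen total
      simpa [PySem.Set.update, hadd] using this
    · have h' : PySem.Set.contains seen id = false := by simpa using h
      have hm : id ∉ seen := by simpa [PySem.Set.contains] using h'
      have hadd : PySem.Set.add seen id = seen ++ [id] := by
        simp [PySem.Set.add, PySem.Set.contains, hm]
      rw [if_neg (by simp [PySem.Set.contains] at h' ⊢; exact h')]
      have hsum : ((PySem.Set.add seen id).map term).sum = (seen.map term).sum + term id := by
        simp [hadd]
      have := ih (PySem.Set.add seen id) (total + term id)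
      rw [show PySem.Set.update seen (id :: rest)
            = PySem.Set.update (PySem.Set.add seen id) rest from rfl]
      omega

theorem pv_count_flatten (x : String) :
    ∀ (ls : List (List String)), (∀ t ∈ ls, t.Nodup) →
    ls.flatten.count x = ls.countP (fun t => t.contains x) := by
  intro ls
  induction ls with
  | nil => intro _; simp
  | cons t rest ih =>
    intro h
    have ht : t.Nodup := h t (by simp)
    have hrest := ih (fun u hu => h u (by simp [hu]))
    simp only [List.flatten_cons, List.count_append, List.countP_cons, hrest]
    by_cases hx : x ∈ t
    · have : t.count x = 1 := List.count_eq_one_of_mem ht hx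
      simp [this, hx]
      omega
    · have : t.count x = 0 := List.count_eq_zero.mpr hx
      simp [this, hx]

-- ===== VERDICT (by name: the statement is the Claim_ definition above) =====
theorem solution_spec : Claim_equal_solution := by
  intro id_list k _ hpre
  have hk : (0:Int) ≤ k := hpre
  unfold Spec_solution solution solution_alt
  simp only
  -- flatten both nested folds over the same stream of ids
  rw [show ∀ (f : PySem.Dict String Int → String → PySem.Dict String Int) (d0 : PySem.Dict String Int),
        id_list.foldl (fun d ids => (PySem.Set.ofList (PySem.Str.split₀ ids)).foldl f d) d0
          = ((id_list.map (fun ids => PySem.Set.ofList (PySem.Str.split₀ ids))).flatten).foldl f d0 from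
      fun f d0 => by rw [List.foldl_flatten, List.foldl_map]]
  rw [show ∀ (f : Int × PySem.Set String → String → Int × PySem.Set String) (st0 : Int × PySem.Set String),
        (id_list.map (fun ids => PySem.Set.ofList (PySem.Str.split₀ ids))).foldl
            (fun st s => s.foldl f st) st0
          = ((id_list.map (fun ids => PySem.Set.ofList (PySem.Str.split₀ ids))).flatten).foldl f st0 from
      fun f st0 => by rw [List.foldl_flatten]]
  set rs := id_list.map (fun ids => PySem.Set.ofList (PySem.Str.split₀ ids)) with hrs
  set ws := rs.flatten with hws
  -- A's result: capped sum over the plain counter of ws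
  obtain ⟨hkeys, hval⟩ := pv_fold_rel k ws PySem.Dict.empty PySem.Dict.empty rfl
    (by intro x; simp [PySem.Dict.getD_empty]; omega)
  set DA := ws.foldl (fun d id =>
      if d.getD id 0 < k then d.insert id (d.getD id 0 + 1)
      else d.insert id (d.getD id 0)) PySem.Dict.empty with hDA
  have hDB : ws.foldl (fun d id => d.insert id (d.getD id 0 + 1)) PySem.Dict.empty
      = PySem.Dict.counter ws := PySem.Dict.foldl_insert_getD_add_one_eq_counter ws
  rw [hDB] at hkeys hval
  have nodupA : DA.keys.Nodup := by
    rw [hkeys, PySem.Dict.keys_counter]; exact PySem.Set.nodup_ofList ws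
  rw [PySem.Dict.values_eq_map_keys DA nodupA 0, hkeys, PySem.Dict.keys_counter]
  -- B's result via the seen-set invariant
  have hb := pv_b_fold (fun id => min ((rs.countP (fun t => PySem.Set.contains t id) : Nat) : Int) k)
      ws PySem.Set.empty 0
  have hempty : ((PySem.Set.empty : PySem.Set String).map
      (fun id => min ((rs.countP (fun t => PySem.Set.contains t id) : Nat) : Int) k)).sum = 0 := by
    simp [PySem.Set.empty]
  rw [hempty, add_zero, zero_add] at hb
  rw [hb, show PySem.Set.update PySem.Set.empty ws = PySem.Set.ofList ws from
      (PySem.Set.ofList_eq_foldl ws).symm]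
  -- the two summands agree pointwise
  congr 1
  apply List.map_congr_left
  intro x _
  rw [hval x, PySem.Dict.getD_counter]
  congr 1
  rw [show List.count x ws = ws.count x from rfl, hws,
      pv_count_flatten x rs (by
        intro t ht
        rw [hrs] at ht
        obtain ⟨ids, _, rfl⟩ := List.mem_map.mp ht
        exact PySem.Set.nodup_ofList _)]
  rfl
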